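-- pv_equiv track=rewrite | github.com/queelius/computational-explorations | src/higher_order_patterns.py | _has_mono_chain
-- ===== SOURCE A (Python) =====
-- from typing import Dict, List, Tuple, Set, Any, Optional
--
-- def _has_mono_chain(chains: List[Tuple[int, ...]], coloring: dict) -> bool:
--     """Check if any chain is monochromatic under the edge coloring."""
--     for chain in chains:
--         colors = set()
--         for i in range(len(chain) - 1):
--             e = (chain[i], chain[i + 1])
--             colors.add(coloring.get(e, -1))
--         if len(colors) == 1 and -1 not in colors:
--             return True
--     return False
-- ===== SOURCE B (Python) =====
-- def _has_mono_chain(chains, coloring):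
--     """Check if any chain is monochromatic under the edge coloring.
--
--     Different strategy: invert the coloring once into color -> set of edges,
--     then a chain is monochromatic iff its edge set is a subset of the color
--     class of its first edge (and that edge is actually colored)."""
--     classes = {}
--     for e, c in coloring.items():
--         classes.setdefault(c, set()).add(e)
--     for chain in chains:
--         edges = set(zip(chain, chain[1:]))
--         if not edges:
--             continue
--         c = coloring.get((chain[0], chain[1]), -1)
--         if c != -1 and edges <= classes.get(c, set()):
--             return True
--     return False
-- ===== Notes on version B (the rewrite author's own statement) =====
-- stated objective: alternative
-- what changed: B inverts the coloring once into a color -> set-of-edges index and decides each chain by a set-inclusion test (its zipped edge set is a subset of the color class of its first edge), instead of A's per-chain accumulation of all distinct edge colors with a cardinality test.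
import Mathlib
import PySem

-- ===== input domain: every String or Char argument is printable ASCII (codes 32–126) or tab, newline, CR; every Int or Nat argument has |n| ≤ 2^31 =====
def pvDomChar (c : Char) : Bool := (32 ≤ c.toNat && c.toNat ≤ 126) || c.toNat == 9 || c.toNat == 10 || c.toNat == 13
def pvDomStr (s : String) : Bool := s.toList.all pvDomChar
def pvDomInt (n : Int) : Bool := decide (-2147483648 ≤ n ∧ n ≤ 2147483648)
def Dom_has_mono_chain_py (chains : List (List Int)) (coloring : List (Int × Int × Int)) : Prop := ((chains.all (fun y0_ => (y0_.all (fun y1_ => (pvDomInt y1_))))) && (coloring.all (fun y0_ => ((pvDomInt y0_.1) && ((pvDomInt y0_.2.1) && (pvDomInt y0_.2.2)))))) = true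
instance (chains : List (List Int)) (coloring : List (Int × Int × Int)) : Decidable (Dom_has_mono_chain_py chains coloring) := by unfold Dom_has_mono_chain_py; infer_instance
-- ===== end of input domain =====

-- B inverts the coloring once into a color -> set-of-edges index and decides each chain by a
-- set-inclusion test, instead of A's per-chain set of distinct edge colors with a cardinality test.

-- coloring.get((a, b), -1): first entry whose key pair matches, else -1
-- (hand port of dict lookup on a pair key flattened to (a, b, c); exact: under the assoc-list
-- dict convention lookup is first match in insertion order)
def colorGet (coloring : List (Int × Int × Int)) (a b : Int) : Int :=
  match coloring with
  | [] => -1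
  | (x, y, c) :: rest => if x == a && y == b then c else colorGet rest a b

-- ===== PORT A =====
-- inner loop: for i in range(len(chain)-1): colors.add(coloring.get((chain[i], chain[i+1]), -1))
def chainColorsA (coloring : List (Int × Int × Int)) (chain : List Int) : PySem.Set Int :=
  (PySem.List.pyRange 0 ((chain.length : Int) - 1) 1).foldl
    (fun s i => PySem.Set.add s
      (colorGet coloring (PySem.List.pyGetD chain i 0) (PySem.List.pyGetD chain (i + 1) 0)))
    PySem.Set.empty

def has_mono_chain_py (chains : List (List Int)) (coloring : List (Int × Int × Int)) : Bool :=
  chains.any (fun chain =>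
    let colors := chainColorsA coloring chain
    colors.length == 1 && !(PySem.Set.contains colors (-1)))

-- ===== PORT B =====
-- coloring.items(): under the assoc-list dict convention the dict's items are the FIRST
-- occurrence of each key, in insertion order (hand port, exact under that convention)
def dictItemsB (coloring : List (Int × Int × Int)) (seen : List (Int × Int)) : List (Int × Int × Int) :=
  match coloring with
  | [] => []
  | (a, b, c) :: rest =>
    if (a, b) ∈ seen then dictItemsB rest seen
    else (a, b, c) :: dictItemsB rest ((a, b) :: seen)

-- classes = {}; for e, c in coloring.items(): classes.setdefault(c, set()).add(e)
def buildClassesB (coloring : List (Int × Int × Int)) : PySem.Dict Int (PySem.Set (Int × Int)) :=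
  (dictItemsB coloring []).foldl
    (fun d ent =>
      d.insert ent.2.2 (PySem.Set.add (d.getD ent.2.2 PySem.Set.empty) (ent.1, ent.2.1)))
    PySem.Dict.empty

-- per-chain body of B's loop
def chainMonoB (coloring : List (Int × Int × Int))
    (classes : PySem.Dict Int (PySem.Set (Int × Int))) (chain : List Int) : Bool :=
  let edges := PySem.Set.ofList (chain.zip chain.tail)
  if edges.isEmpty then false
  else
    let c := colorGet coloring (PySem.List.pyGetD chain 0 0) (PySem.List.pyGetD chain 1 0)
    c != -1 && PySem.Set.issubset edges (classes.getD c PySem.Set.empty)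

def has_mono_chain_py_alt (chains : List (List Int)) (coloring : List (Int × Int × Int)) : Bool :=
  let classes := buildClassesB coloring
  chains.any (chainMonoB coloring classes)

-- ===== PRECONDITION & SPEC =====
def Spec_has_mono_chain_py (chains : List (List Int)) (coloring : List (Int × Int × Int)) (out : Bool) : Prop := out = has_mono_chain_py_alt chains coloring
instance (chains : List (List Int)) (coloring : List (Int × Int × Int)) (out : Bool) : Decidable (Spec_has_mono_chain_py chains coloring out) := by unfold Spec_has_mono_chain_py; infer_instance

-- ===== CLAIM (what is proved, stated in full; the proofs are below) =====
def Claim_equal_has_mono_chain_py : Prop := ∀ (chains : List (List Int)) (coloring : List (Int × Int × Int)), Dom_has_mono_chain_py chains coloring → Spec_has_mono_chain_py chains coloring (has_mono_chain_py chains coloring)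

-- ===== LEMMAS AND PROOFS =====

-- A's set fold is set(list of edge colors)
theorem chainColorsA_eq_ofList (coloring : List (Int × Int × Int)) (chain : List Int) :
    chainColorsA coloring chain =
      PySem.Set.ofList ((PySem.List.pyRange 0 ((chain.length : Int) - 1) 1).map
        (fun i => colorGet coloring (PySem.List.pyGetD chain i 0) (PySem.List.pyGetD chain (i + 1) 0))) := by
  rw [chainColorsA, ← PySem.Set.update_map_eq_foldl_add, PySem.Set.update_empty]

-- the indexed edge list is the zip of the chain with its tail
theorem range_map_eq_zip (xs : List Int) :
    (List.range (xs.length - 1)).map (fun k => (xs.getD k 0, xs.getD (k + 1) 0))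
      = xs.zip xs.tail := by
  apply List.ext_getElem
  · simp [List.length_zip]
  · intro i h1 h2
    have hi : i + 1 < xs.length := by
      simp [List.length_zip] at h2; omega
    have hi0 : i < xs.length := by omega
    simp only [List.getElem_map, List.getElem_range, List.getElem_zip, List.getElem_tail]
    rw [List.getD_eq_getElem _ _ hi0, List.getD_eq_getElem _ _ hi]

theorem idx_map_eq_zip (chain : List Int) :
    (PySem.List.pyRange 0 ((chain.length : Int) - 1) 1).map
        (fun i => (PySem.List.pyGetD chain i 0, PySem.List.pyGetD chain (i + 1) 0))
      = chain.zip chain.tail := by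
  rw [PySem.List.pyRange_one, List.map_map]
  have hfun : ((fun i => (PySem.List.pyGetD chain i 0, PySem.List.pyGetD chain (i + 1) 0)) ∘
      fun k : Nat => (0 : Int) + (k : Int))
      = fun k : Nat => (chain.getD k 0, chain.getD (k + 1) 0) := by
    funext k
    have h1 : (0 : Int) + (k : Int) = ((k : Nat) : Int) := by ring
    have h2 : (k : Int) + 1 = (((k + 1 : Nat)) : Int) := by push_cast; ring
    simp only [Function.comp, h1, h2, PySem.List.pyGetD_natCast]
  have hlen : (((chain.length : Int) - 1) - 0).toNat = chain.length - 1 := by omega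
  rw [hfun, hlen, range_map_eq_zip]

-- set(x :: xs) is a singleton iff every element equals x
theorem ofList_length_one_iff (x : Int) (xs : List Int) :
    (PySem.Set.ofList (x :: xs)).length = 1 ↔ ∀ y ∈ xs, y = x := by
  have h0 : ∀ n : Nat, n + 1 = 1 ↔ n = 0 := by omega
  rw [PySem.Set.ofList_cons, List.length_cons, h0, List.length_eq_zero_iff,
    List.eq_nil_iff_forall_not_mem]
  constructor
  · intro h y hy
    by_contra hne
    exact h y (by rw [PySem.Set.mem_discard, PySem.Set.mem_ofList]; exact ⟨hy, hne⟩)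
  · intro h y hy
    rw [PySem.Set.mem_discard, PySem.Set.mem_ofList] at hy
    exact hy.2 (h y hy.1)

-- membership in a color class of the inverted index, generalized over the accumulator
theorem mem_classes_foldl (L : List (Int × Int × Int)) (d : PySem.Dict Int (PySem.Set (Int × Int)))
    (e : Int × Int) (c : Int) :
    (e ∈ (L.foldl (fun d ent =>
        d.insert ent.2.2 (PySem.Set.add (d.getD ent.2.2 PySem.Set.empty) (ent.1, ent.2.1))) d).getD c PySem.Set.empty)
      ↔ e ∈ d.getD c PySem.Set.empty ∨ (e.1, e.2, c) ∈ L := by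
  induction L generalizing d with
  | nil => simp
  | cons hd tl ih =>
    obtain ⟨a, b, c'⟩ := hd
    rw [List.foldl_cons, ih]
    simp only [PySem.Dict.getD_insert, List.mem_cons]
    by_cases hc : c = c'
    · subst hc
      rw [if_pos rfl]
      simp only [PySem.Set.mem_add]
      constructor
      · rintro ((h | rfl) | h) <;> simp_all
      · rintro (h | h | h)
        · exact Or.inl (Or.inl h)
        · exact Or.inl (Or.inr (by simpa using congrArg (fun t => (t.1, t.2.1)) h))
        · exact Or.inr h
    · rw [if_neg hc]
      constructor
      · rintro (h | h)
        · exact Or.inl h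
        · exact Or.inr (Or.inr h)
      · rintro (h | h | h)
        · exact Or.inl h
        · exact absurd (congrArg (fun t => t.2.2) h) hc
        · exact Or.inr h

-- membership in the deduped items: not for keys already seen …
theorem not_mem_dictItemsB_of_seen (L : List (Int × Int × Int)) (seen : List (Int × Int))
    (e₁ e₂ c : Int) (h : (e₁, e₂) ∈ seen) : (e₁, e₂, c) ∉ dictItemsB L seen := by
  induction L generalizing seen with
  | nil => simp [dictItemsB]
  | cons hd tl ih =>
    obtain ⟨a, b, c'⟩ := hd
    rw [dictItemsB]
    split
    · exact ih seen h
    · intro hmem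
      rcases List.mem_cons.mp hmem with heq | hmem
      · rename_i hnot
        exact hnot (by injection heq with h1 h2; injection h2 with h2 h3; subst h1; subst h2; exact h)
      · exact ih _ (List.mem_cons_of_mem _ h) hmem

-- … and for unseen keys it is exactly "first-match lookup yields c" (for a present color c ≠ -1)
theorem mem_dictItemsB_iff (L : List (Int × Int × Int)) (seen : List (Int × Int))
    (e₁ e₂ c : Int) (hc : c ≠ -1) (h : (e₁, e₂) ∉ seen) :
    (e₁, e₂, c) ∈ dictItemsB L seen ↔ colorGet L e₁ e₂ = c := by
  induction L generalizing seen with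
  | nil => simp [dictItemsB, colorGet, Ne.symm hc]
  | cons hd tl ih =>
    obtain ⟨a, b, c'⟩ := hd
    rw [dictItemsB, colorGet]
    by_cases hk : a = e₁ ∧ b = e₂
    · obtain ⟨rfl, rfl⟩ := hk
      rw [if_neg h, if_pos (by simp)]
      simp only [List.mem_cons]
      constructor
      · rintro (heq | hmem)
        · injection heq with h1 h2; injection h2 with h2 h3; exact h3.symm
        · exact absurd hmem (not_mem_dictItemsB_of_seen _ _ _ _ _ (by simp))
      · intro hcc; exact Or.inl (by rw [hcc])
    · have hk' : ¬(a == e₁ && b == e₂) = true := by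
        simp only [Bool.and_eq_true, beq_iff_eq]; exact hk
      rw [if_neg hk']
      split
      · exact ih seen h
      · rw [List.mem_cons]
        constructor
        · rintro (heq | hmem)
          · exact absurd (by injection heq with h1 h2; injection h2 with h2 h3; exact ⟨h1.symm, h2.symm⟩) hk
          · exact (ih _ (by simp [h]; intro h1 h2; exact hk ⟨h1.symm, h2.symm⟩)).mp hmem
        · intro hcc
          exact Or.inr ((ih ((a, b) :: seen)
            (by simp [h]; intro h1 h2; exact hk ⟨h1.symm, h2.symm⟩)).mpr hcc)

-- for c ≠ -1, an edge lies in B's class of c iff its first-match color is c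
theorem mem_class_iff (coloring : List (Int × Int × Int)) (e : Int × Int) (c : Int) (hc : c ≠ -1) :
    e ∈ (buildClassesB coloring).getD c PySem.Set.empty ↔ colorGet coloring e.1 e.2 = c := by
  rw [buildClassesB, mem_classes_foldl]
  simp only [PySem.Dict.getD_empty, PySem.Set.empty]
  rw [mem_dictItemsB_iff _ _ _ _ _ hc (by simp)]
  simp

-- Set.contains as membership
theorem set_contains_false_iff (s : PySem.Set Int) (x : Int) :
    PySem.Set.contains s x = false ↔ x ∉ s := by
  simp [PySem.Set.contains]

-- per-chain agreement
theorem chain_eq (coloring : List (Int × Int × Int)) (chain : List Int) :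
    (let colors := chainColorsA coloring chain
     (colors.length == 1 && !(PySem.Set.contains colors (-1)))) = chainMonoB coloring (buildClassesB coloring) chain := by
  show ((chainColorsA coloring chain).length == 1
      && !(PySem.Set.contains (chainColorsA coloring chain) (-1))) = _
  rw [chainColorsA_eq_ofList]
  have hcolors : (PySem.List.pyRange 0 ((chain.length : Int) - 1) 1).map
      (fun i => colorGet coloring (PySem.List.pyGetD chain i 0) (PySem.List.pyGetD chain (i + 1) 0))
      = (chain.zip chain.tail).map (fun p => colorGet coloring p.1 p.2) := by
    rw [← idx_map_eq_zip chain, List.map_map]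
    rfl
  rw [hcolors]
  match chain with
  | [] => rfl
  | [a] => rfl
  | a :: b :: t =>
    have h0 : PySem.List.pyGetD (a :: b :: t) 0 0 = a := by simp [pysem]
    have h1 : PySem.List.pyGetD (a :: b :: t) 1 0 = b := by simp [pysem]
    rw [chainMonoB]
    simp only [h0, h1, List.tail_cons, List.zip_cons_cons]
    have hne : (PySem.Set.ofList ((a, b) :: (b :: t).zip t)).isEmpty = false := by
      rw [PySem.Set.ofList_cons]; rfl
    rw [hne]
    simp only [Bool.false_eq_true, if_false, List.map_cons]
    rw [Bool.eq_iff_iff]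
    simp only [Bool.and_eq_true, beq_iff_eq, Bool.not_eq_true', bne_iff_ne, ne_eq,
      set_contains_false_iff, PySem.Set.issubset_iff, ofList_length_one_iff]
    constructor
    · rintro ⟨hall, hnm⟩
      have hc0 : colorGet coloring a b ≠ -1 := by
        intro h
        exact hnm (by rw [PySem.Set.mem_ofList]; exact h ▸ List.mem_cons_self)
      refine ⟨hc0, ?_⟩
      intro e he
      rw [PySem.Set.mem_ofList] at he
      rw [mem_class_iff _ _ _ hc0]
      rcases List.mem_cons.mp he with rfl | hm
      · rfl
      · exact hall _ (List.mem_map_of_mem hm)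
    · rintro ⟨hc0, hsub⟩
      constructor
      · intro y hy
        obtain ⟨e, he, rfl⟩ := List.mem_map.mp hy
        have hmem := hsub e (by rw [PySem.Set.mem_ofList]; exact List.mem_cons_of_mem _ he)
        rwa [mem_class_iff _ _ _ hc0] at hmem
      · intro hm
        rw [PySem.Set.mem_ofList] at hm
        rcases List.mem_cons.mp hm with h | h
        · exact hc0 h.symm
        · obtain ⟨e, he, hfe⟩ := List.mem_map.mp h
          have hmem := hsub e (by rw [PySem.Set.mem_ofList]; exact List.mem_cons_of_mem _ he)
          rw [mem_class_iff _ _ _ hc0] at hmem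
          exact hc0 (hmem.symm.trans hfe)
theorem has_mono_chain_py_eq (chains : List (List Int)) (coloring : List (Int × Int × Int)) :
    has_mono_chain_py chains coloring = has_mono_chain_py_alt chains coloring := by
  unfold has_mono_chain_py has_mono_chain_py_alt
  exact PySem.List.any_congr_mem (fun chain _ => chain_eq coloring chain)

-- ===== VERDICT (by name: the statement is the Claim_ definition above) =====
theorem has_mono_chain_py_spec : Claim_equal_has_mono_chain_py := by
  intro chains coloring _
  exact has_mono_chain_py_eq chains coloring
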